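-- pv_equiv track=rewrite | github.com/Tim-Spurlin/WifiObserver | src/network_classifier.py | analyze_network_distribution
-- ===== SOURCE A (Python) =====
-- def analyze_network_distribution(networks):
--     """Analyze the distribution of network types
--
--     Args:
--         networks (dict): Dictionary of networks
--
--     Returns:
--         dict: Dictionary with network type distribution
--     """
--     distribution = {
--         "POSSIBLE_OFFICIAL": 0,
--         "ENTERPRISE": 0,
--         "MOBILE_HOTSPOT": 0,
--         "PUBLIC": 0,
--         "IOT": 0,
--         "ISP_PROVIDED": 0,
--         "STANDARD": 0
--     }
--
--     for network in networks.values():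
--         network_type = network.get("type", "STANDARD")
--         if network_type in distribution:
--             distribution[network_type] += 1
--         else:
--             distribution["STANDARD"] += 1
--
--     return distribution
-- ===== SOURCE B (Python) =====
-- def analyze_network_distribution(networks):
--     """Analyze the distribution of network types.
--
--     Different algorithm: divide-and-conquer. Count vectors (7-tuples, one slot
--     per known type, unknown types folded into the STANDARD slot) are computed
--     recursively for the two halves of the value list and merged by component-wise
--     addition; the result dict is assembled once at the end from the vector.
--     """
--     keys = ("POSSIBLE_OFFICIAL", "ENTERPRISE", "MOBILE_HOTSPOT", "PUBLIC",
--             "IOT", "ISP_PROVIDED", "STANDARD")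
--     vals = list(networks.values())
--
--     def count(lo, hi):
--         if hi - lo == 0:
--             return (0, 0, 0, 0, 0, 0, 0)
--         if hi - lo == 1:
--             t = vals[lo].get("type", "STANDARD")
--             i = keys.index(t) if t in keys else 6
--             return tuple(1 if j == i else 0 for j in range(7))
--         mid = (lo + hi) // 2
--         return tuple(x + y for x, y in zip(count(lo, mid), count(mid, hi)))
--
--     return dict(zip(keys, count(0, len(vals))))
-- ===== Notes on version B (the rewrite author's own statement) =====
-- stated objective: alternative
-- what changed: A increments a mutable seven-key dict in place per element; B is a divide-and-conquer recursion that computes a 7-component count vector for each half of the value list, merges halves by component-wise addition, and builds the dict once at the end from the vector.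
import Mathlib
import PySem

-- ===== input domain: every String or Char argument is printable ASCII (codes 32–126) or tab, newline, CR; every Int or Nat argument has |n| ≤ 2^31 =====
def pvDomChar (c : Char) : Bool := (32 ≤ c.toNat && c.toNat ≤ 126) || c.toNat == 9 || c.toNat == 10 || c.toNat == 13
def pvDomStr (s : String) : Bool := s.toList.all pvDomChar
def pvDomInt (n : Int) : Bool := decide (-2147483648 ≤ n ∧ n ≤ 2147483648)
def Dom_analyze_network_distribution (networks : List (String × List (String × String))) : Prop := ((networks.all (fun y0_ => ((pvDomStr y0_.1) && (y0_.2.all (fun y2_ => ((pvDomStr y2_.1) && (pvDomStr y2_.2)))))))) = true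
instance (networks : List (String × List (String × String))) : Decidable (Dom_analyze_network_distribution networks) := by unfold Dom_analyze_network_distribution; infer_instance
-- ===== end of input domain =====

-- B replaces A's in-place per-element dict increments with a divide-and-conquer
-- recursion that merges 7-component count vectors of the two halves and builds the
-- dict once at the end (alternative algorithm, same result).

-- ===== PORT A =====
def analyze_network_distribution (networks : List (String × List (String × String))) : List (String × Int) :=
  let distribution : PySem.Dict String Int := PySem.Dict.ofList
    [("POSSIBLE_OFFICIAL", 0), ("ENTERPRISE", 0), ("MOBILE_HOTSPOT", 0),
     ("PUBLIC", 0), ("IOT", 0), ("ISP_PROVIDED", 0), ("STANDARD", 0)]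
  let final := networks.foldl (fun d network =>
      let network_type := (PySem.Dict.mk network.2).getD "type" "STANDARD"
      if d.contains network_type then d.modify network_type 0 (· + 1)
      else d.modify "STANDARD" 0 (· + 1)) distribution
  final.items

-- ===== PORT B =====
def pvAltKeys : List String := ["POSSIBLE_OFFICIAL", "ENTERPRISE", "MOBILE_HOTSPOT",
  "PUBLIC", "IOT", "ISP_PROVIDED", "STANDARD"]

-- the inner 'count(lo, hi)': recursion on the slice vals[lo:hi], halves merged by
-- component-wise addition (zip of the two recursive count vectors)
def pvCount (vals : List (List (String × String))) : List Int :=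
  match vals with
  | [] => [0, 0, 0, 0, 0, 0, 0]
  | [v] =>
    (List.range 7).map (fun j =>
      if j = (if (PySem.Dict.mk v).getD "type" "STANDARD" ∈ pvAltKeys
              then (PySem.List.index? pvAltKeys ((PySem.Dict.mk v).getD "type" "STANDARD")).getD 6
              else 6)
      then (1 : Int) else 0)
  | v1 :: v2 :: rest =>
    (pvCount ((v1 :: v2 :: rest).take ((v1 :: v2 :: rest).length / 2))).zipWith (· + ·)
      (pvCount ((v1 :: v2 :: rest).drop ((v1 :: v2 :: rest).length / 2)))
termination_by vals.length
decreasing_by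
  · simp; omega
  · simp; omega

def analyze_network_distribution_alt (networks : List (String × List (String × String))) : List (String × Int) :=
  let vals := networks.map Prod.snd
  (PySem.Dict.ofList (pvAltKeys.zip (pvCount vals))).items

-- ===== PRECONDITION & SPEC =====
def Spec_analyze_network_distribution (networks : List (String × List (String × String))) (out : List (String × Int)) : Prop := out = analyze_network_distribution_alt networks
instance (networks : List (String × List (String × String))) (out : List (String × Int)) : Decidable (Spec_analyze_network_distribution networks out) := by unfold Spec_analyze_network_distribution; infer_instance

-- ===== CLAIM (what is proved, stated in full; the proofs are below) =====
def Claim_equal_analyze_network_distribution : Prop := ∀ (networks : List (String × List (String × String))), Dom_analyze_network_distribution networks → Spec_analyze_network_distribution networks (analyze_network_distribution networks)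

-- ===== LEMMAS AND PROOFS =====
def pvBucket (v : List (String × String)) : String :=
  let t := (PySem.Dict.mk v).getD "type" "STANDARD"
  if t ∈ pvAltKeys then t else "STANDARD"

theorem pvBucket_mem (v : List (String × String)) : pvBucket v ∈ pvAltKeys := by
  unfold pvBucket
  by_cases h : (PySem.Dict.mk v).getD "type" "STANDARD" ∈ pvAltKeys
  · simp [h]
  · simp [h]; decide

-- A's loop, with the contains-branch resolved, is a counting fold over the bucketed values.
theorem foldA_eq (networks : List (String × List (String × String)))
    (d : PySem.Dict String Int) (hc : ∀ s, d.contains s = true ↔ s ∈ pvAltKeys) :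
    networks.foldl (fun d network =>
      let network_type := (PySem.Dict.mk network.2).getD "type" "STANDARD"
      if d.contains network_type then d.modify network_type 0 (· + 1)
      else d.modify "STANDARD" 0 (· + 1)) d
    = (networks.map (fun nw => pvBucket nw.2)).foldl (fun d t => d.modify t 0 (· + 1)) d := by
  induction networks generalizing d with
  | nil => rfl
  | cons nw rest ih =>
    simp only [List.foldl_cons, List.map_cons]
    have hstep : (let network_type := (PySem.Dict.mk nw.2).getD "type" "STANDARD"
        if d.contains network_type then d.modify network_type 0 (· + 1)
        else d.modify "STANDARD" 0 (· + 1)) = d.modify (pvBucket nw.2) 0 (· + 1) := by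
      simp only [pvBucket]
      by_cases h : (PySem.Dict.mk nw.2).getD "type" "STANDARD" ∈ pvAltKeys
      · rw [if_pos ((hc _).mpr h), if_pos h]
      · rw [if_neg (by simp [hc, h]), if_neg h]
    rw [hstep]
    exact ih _ (by intro s; rw [PySem.Dict.contains_modify]; by_cases hs : s = pvBucket nw.2 <;>
      simp [hs, hc, pvBucket_mem nw.2])

theorem pvInit_getD (k : String) (hk : k ∈ pvAltKeys) :
    (PySem.Dict.ofList
      [("POSSIBLE_OFFICIAL", (0:Int)), ("ENTERPRISE", 0), ("MOBILE_HOTSPOT", 0),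
       ("PUBLIC", 0), ("IOT", 0), ("ISP_PROVIDED", 0), ("STANDARD", 0)]).getD k 0 = 0 := by
  fin_cases hk <;> decide

theorem pvInit_contains (s : String) :
    (PySem.Dict.ofList
      [("POSSIBLE_OFFICIAL", (0:Int)), ("ENTERPRISE", 0), ("MOBILE_HOTSPOT", 0),
       ("PUBLIC", 0), ("IOT", 0), ("ISP_PROVIDED", 0), ("STANDARD", 0)]).contains s = true ↔ s ∈ pvAltKeys := by
  rw [PySem.Dict.contains_iff_mem_keys]
  have h : (PySem.Dict.ofList
      [("POSSIBLE_OFFICIAL", (0:Int)), ("ENTERPRISE", 0), ("MOBILE_HOTSPOT", 0),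
       ("PUBLIC", 0), ("IOT", 0), ("ISP_PROVIDED", 0), ("STANDARD", 0)]).keys = pvAltKeys := by decide
  rw [h]

-- A's result, characterised: the seven keys in template order, each with its bucket count.
theorem pvA_char (networks : List (String × List (String × String))) :
    analyze_network_distribution networks
    = pvAltKeys.map (fun k => (k, (((networks.map (fun nw => pvBucket nw.2)).count k : Nat) : Int))) := by
  unfold analyze_network_distribution
  simp only
  rw [foldA_eq _ _ pvInit_contains]
  have hkeys : ((networks.map (fun nw => pvBucket nw.2)).foldl
      (fun d t => d.modify t 0 (· + 1))
      (PySem.Dict.ofList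
        [("POSSIBLE_OFFICIAL", (0:Int)), ("ENTERPRISE", 0), ("MOBILE_HOTSPOT", 0),
         ("PUBLIC", 0), ("IOT", 0), ("ISP_PROVIDED", 0), ("STANDARD", 0)])).keys = pvAltKeys := by
    rw [PySem.Dict.keys_foldl_modify]
    have h0 : (PySem.Dict.ofList
      [("POSSIBLE_OFFICIAL", (0:Int)), ("ENTERPRISE", 0), ("MOBILE_HOTSPOT", 0),
       ("PUBLIC", 0), ("IOT", 0), ("ISP_PROVIDED", 0), ("STANDARD", 0)]).keys = pvAltKeys := by decide
    rw [h0, PySem.Set.update_eq_append_filter]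
    have hnil : ((PySem.Set.ofList (networks.map (fun nw => pvBucket nw.2))).filter
        (fun y => !(PySem.Set.contains pvAltKeys y))) = [] := by
      rw [List.filter_eq_nil_iff]
      intro y hy
      have hy' : y ∈ networks.map (fun nw => pvBucket nw.2) := (PySem.Set.mem_ofList _ _).mp hy
      obtain ⟨nw, _, rfl⟩ := List.mem_map.mp hy'
      simp
      exact pvBucket_mem nw.2
    rw [hnil, List.append_nil]
  rw [PySem.Dict.items_eq_map_keys _ (by rw [hkeys]; decide) 0, hkeys]
  apply List.map_congr_left
  intro k hk
  rw [PySem.Dict.getD_foldl_modify_add_one, pvInit_getD k hk, zero_add]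

theorem pv_zip_self_map {α β : Type} (l : List α) (f : α → β) :
    l.zip (l.map f) = l.map (fun x => (x, f x)) := by
  induction l with
  | nil => rfl
  | cons x xs ih => simp [ih]

-- the single-element case of pvCount, as a fact about an arbitrary type string
theorem pvCount_single_case (t : String) :
    (List.range 7).map (fun j => if j = (if t ∈ pvAltKeys then (PySem.List.index? pvAltKeys t).getD 6 else 6) then (1 : Int) else 0)
    = pvAltKeys.map (fun k => ((([if t ∈ pvAltKeys then t else "STANDARD"].count k : Nat) : Int))) := by
  by_cases h : t ∈ pvAltKeys
  · simp only [if_pos h]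
    have h' := h
    simp only [pvAltKeys, List.mem_cons, List.not_mem_nil, or_false] at h'
    rcases h' with rfl | rfl | rfl | rfl | rfl | rfl | rfl <;> decide
  · simp only [if_neg h]
    decide

-- pvCount computes, for each template key, the bucket count of the slice.
theorem pvCount_spec (vals : List (List (String × String))) :
    pvCount vals = pvAltKeys.map (fun k => (((vals.map pvBucket).count k : Nat) : Int)) := by
  induction vals using pvCount.induct with
  | case1 => rw [pvCount]; decide
  | case2 v =>
    rw [pvCount, pvCount_single_case]
    simp only [pvBucket, List.map_cons, List.map_nil]
  | case3 v1 v2 rest ih1 ih2 =>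
    rw [pvCount, ih1, ih2, List.zipWith_map, List.zipWith_self]
    have hsplit : ((v1 :: v2 :: rest).take ((v1 :: v2 :: rest).length / 2)).map pvBucket
        ++ ((v1 :: v2 :: rest).drop ((v1 :: v2 :: rest).length / 2)).map pvBucket
        = (v1 :: v2 :: rest).map pvBucket := by
      rw [← List.map_append, List.take_append_drop]
    apply List.map_congr_left
    intro k _
    rw [← hsplit, List.count_append]
    push_cast
    ring

-- ===== VERDICT (by name: the statement is the Claim_ definition above) =====
theorem analyze_network_distribution_spec : Claim_equal_analyze_network_distribution := by
  intro networks _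
  unfold Spec_analyze_network_distribution analyze_network_distribution_alt
  simp only
  have hmm : (networks.map Prod.snd).map pvBucket = networks.map (fun nw => pvBucket nw.2) := by
    rw [List.map_map]; exact List.map_congr_left (fun a _ => rfl)
  rw [pvCount_spec, hmm, pv_zip_self_map, pvA_char]
  rfl
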